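-- pv_equiv track=rewrite | github.com/benjamingarrett/table_maker100 | olcs4_traceback_analysis.py | running_max
-- ===== SOURCE A (Python) =====
-- def running_max(data,n0,n2,col):
--   running_max_x = [data[n0][0]]
--   running_max_y = [data[n0][col]]
--   j = n0
--   while j < len(data):
--     if j <= n2:
--       running_max_x.append(data[j][0])
--       if data[j][col] > running_max_y[-1]:
--         running_max_y.append(data[j][col])
--       else:
--         running_max_y.append(running_max_y[-1])
--     else:
--       break
--     j+=1
--   return running_max_x, running_max_y
-- ===== SOURCE B (Python) =====
-- def running_max(data, n0, n2, col):
--     # alternative: each y-element is computed independently as the maximum of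
--     # the prefix data[n0..j][col] (no running accumulator, no while/break)
--     end = min(n2, len(data) - 1)
--     xs = [data[n0][0]] + [data[j][0] for j in range(n0, end + 1)]
--     ys = [data[n0][col]] + [max(data[i][col] for i in range(n0, j + 1))
--                             for j in range(n0, end + 1)]
--     return xs, ys
-- ===== Notes on version B (the rewrite author's own statement) =====
-- stated objective: alternative
-- what changed: Replaces the stateful while/break loop with its running-max accumulator by a stateless formulation: the end index is computed up front and each output element is an independent prefix maximum max(data[n0..j][col]), trading the O(k) single pass for O(k^2) independent maxima.
import Mathlib
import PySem

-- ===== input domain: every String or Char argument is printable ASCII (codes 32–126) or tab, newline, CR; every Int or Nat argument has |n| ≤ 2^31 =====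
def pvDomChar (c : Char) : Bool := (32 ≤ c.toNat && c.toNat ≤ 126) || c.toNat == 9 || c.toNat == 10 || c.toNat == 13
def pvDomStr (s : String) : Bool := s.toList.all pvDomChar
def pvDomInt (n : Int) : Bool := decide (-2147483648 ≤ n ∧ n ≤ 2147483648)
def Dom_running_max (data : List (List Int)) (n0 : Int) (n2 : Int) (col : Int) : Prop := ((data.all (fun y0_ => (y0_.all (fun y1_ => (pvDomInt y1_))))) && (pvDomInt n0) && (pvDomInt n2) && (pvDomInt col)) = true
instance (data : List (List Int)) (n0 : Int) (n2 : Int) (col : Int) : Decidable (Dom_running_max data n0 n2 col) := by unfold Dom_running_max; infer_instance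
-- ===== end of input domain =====

-- B replaces the stateful running-max loop by stateless independent prefix maxima
-- (each y-element is max(data[n0..j][col]) computed from scratch); O(k^2) vs O(k), not faster.

-- ===== PORT A =====
-- the while loop, fuel = number of indices j with j < len(data) remaining
def runningA (data : List (List Int)) (n2 col : Int) :
    Nat → Int → List Int → List Int → List Int × List Int
  | 0, _, rx, ry => (rx, ry)
  | fuel + 1, j, rx, ry =>
    if j ≤ n2 then
      let row := PySem.List.pyGetD data j []
      let rx' := rx ++ [PySem.List.pyGetD row 0 0]
      let y := PySem.List.pyGetD row col 0
      let last := PySem.List.pyGetD ry (-1) 0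
      let ry' := if y > last then ry ++ [y] else ry ++ [last]
      runningA data n2 col fuel (j + 1) rx' ry'
    else (rx, ry)

def running_max (data : List (List Int)) (n0 : Int) (n2 : Int) (col : Int) : List Int × List Int :=
  let row0 := PySem.List.pyGetD data n0 []
  let rx := [PySem.List.pyGetD row0 0 0]
  let ry := [PySem.List.pyGetD row0 col 0]
  runningA data n2 col ((data.length : Int) - n0).toNat n0 rx ry

-- ===== PORT B =====
def running_max_alt (data : List (List Int)) (n0 : Int) (n2 : Int) (col : Int) : List Int × List Int :=
  let endIdx := min n2 ((data.length : Int) - 1)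
  let idxs := PySem.List.pyRange n0 (endIdx + 1) 1
  let f0 := fun j => PySem.List.pyGetD (PySem.List.pyGetD data j []) 0 0
  let f := fun j => PySem.List.pyGetD (PySem.List.pyGetD data j []) col 0
  (f0 n0 :: idxs.map f0,
   -- max(generator): list is nonempty for every j ∈ idxs (j ≥ n0), so the .getD default is unreachable
   f n0 :: idxs.map (fun j =>
     (PySem.List.max? ((PySem.List.pyRange n0 (j + 1) 1).map f) (fun y => y)).getD 0))

-- ===== PRECONDITION & SPEC =====
-- row accessed as data[j] exists and both data[j][0] and data[j][col] are in range
def okRow (data : List (List Int)) (col j : Int) : Bool :=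
  match PySem.List.pyGet? data j with
  | some row => decide (row ≠ [] ∧ -(row.length : Int) ≤ col ∧ col < (row.length : Int))
  | none => false

-- Pre_ excludes exactly the inputs on which the Python A raises IndexError:
-- n0 out of range for data, or some scanned row empty / col out of range for it.
def Pre_running_max (data : List (List Int)) (n0 : Int) (n2 : Int) (col : Int) : Prop :=
  -(data.length : Int) ≤ n0 ∧ n0 < (data.length : Int) ∧ okRow data col n0 = true ∧
  ∀ j ∈ PySem.List.pyRange n0 (min n2 ((data.length : Int) - 1) + 1) 1, okRow data col j = true

instance (data : List (List Int)) (n0 : Int) (n2 : Int) (col : Int) : Decidable (Pre_running_max data n0 n2 col) := by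
  unfold Pre_running_max; infer_instance

def pvWitness_running_max : List (List Int) × Int × Int × Int := ([[1, 4], [2, 3], [3, 5]], 0, 2, 1)

def Spec_running_max (data : List (List Int)) (n0 : Int) (n2 : Int) (col : Int) (out : List Int × List Int) : Prop := out = running_max_alt data n0 n2 col
instance (data : List (List Int)) (n0 : Int) (n2 : Int) (col : Int) (out : List Int × List Int) : Decidable (Spec_running_max data n0 n2 col out) := by unfold Spec_running_max; infer_instance

-- ===== CLAIM (what is proved, stated in full; the proofs are below) =====
def Claim_equal_running_max : Prop := ∀ (data : List (List Int)) (n0 : Int) (n2 : Int) (col : Int), Dom_running_max data n0 n2 col → Pre_running_max data n0 n2 col → Spec_running_max data n0 n2 col (running_max data n0 n2 col)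

-- ===== LEMMAS AND PROOFS =====

-- proof-side running maximum (the accumulator A's loop maintains)
def accMax : Int → List Int → List Int
  | _, [] => []
  | acc, h :: t => let m := max acc h; m :: accMax m t

-- A's loop produces the running maximum of the scanned column values
theorem runningA_eq (data : List (List Int)) (n2 col : Int) :
    ∀ (fuel : Nat) (j : Int) (rx ys : List Int) (m : Int),
      fuel = ((data.length : Int) - j).toNat →
      runningA data n2 col fuel j rx (ys ++ [m]) =
        (rx ++ (PySem.List.pyRange j (min n2 ((data.length : Int) - 1) + 1) 1).map
                (fun k => PySem.List.pyGetD (PySem.List.pyGetD data k []) 0 0),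
         (ys ++ [m]) ++ accMax m ((PySem.List.pyRange j (min n2 ((data.length : Int) - 1) + 1) 1).map
                (fun k => PySem.List.pyGetD (PySem.List.pyGetD data k []) col 0))) := by
  intro fuel
  induction fuel with
  | zero =>
    intro j rx ys m hf
    have hj : (data.length : Int) ≤ j := by omega
    rw [PySem.List.pyRange_one_eq_nil (by omega)]
    simp [runningA, accMax]
  | succ fuel ih =>
    intro j rx ys m hf
    have hjlt : j < (data.length : Int) := by omega
    by_cases hjn : j ≤ n2
    · have hcons : PySem.List.pyRange j (min n2 ((data.length : Int) - 1) + 1) 1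
          = j :: PySem.List.pyRange (j + 1) (min n2 ((data.length : Int) - 1) + 1) 1 :=
        PySem.List.pyRange_one_cons (by omega)
      rw [hcons]
      show runningA data n2 col (fuel + 1) j rx (ys ++ [m]) = _
      rw [runningA]
      simp only [if_pos hjn, PySem.List.pyGetD_neg_one_append_singleton]
      have hfuel : fuel = ((data.length : Int) - (j + 1)).toNat := by omega
      set y := PySem.List.pyGetD (PySem.List.pyGetD data j []) col 0 with hy
      by_cases hgt : y > m
      · have hmax : max m y = y := max_eq_right (le_of_lt hgt)
        simp only [if_pos hgt]
        rw [show ys ++ [m] ++ [y] = (ys ++ [m]) ++ [y] by simp]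
        rw [ih (j + 1) _ (ys ++ [m]) y hfuel]
        simp [accMax]
        rw [← hy, hmax]
        exact ⟨rfl, rfl⟩
      · have hmax : max m y = m := max_eq_left (by omega : y ≤ m)
        simp only [if_neg hgt]
        rw [show ys ++ [m] ++ [m] = (ys ++ [m]) ++ [m] by simp]
        rw [ih (j + 1) _ (ys ++ [m]) m hfuel]
        simp [accMax]
        rw [← hy, hmax]
        exact ⟨by omega, rfl⟩
    · have hnil : PySem.List.pyRange j (min n2 ((data.length : Int) - 1) + 1) 1 = [] :=
        PySem.List.pyRange_one_eq_nil (by omega)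
      rw [hnil]
      show runningA data n2 col (fuel + 1) j rx (ys ++ [m]) = _
      rw [runningA]
      simp [if_neg hjn, accMax]

-- B's per-index prefix maximum, as the port computes it
def prefMax (f : Int → Int) (n0 j : Int) : Int :=
  (PySem.List.max? ((PySem.List.pyRange n0 (j + 1) 1).map f) (fun y => y)).getD 0

theorem prefMax_base (f : Int → Int) (n0 : Int) : prefMax f n0 n0 = f n0 := by
  unfold prefMax
  rw [PySem.List.pyRange_one_singleton]
  simp [PySem.List.max?_id_cons]

theorem prefMax_step (f : Int → Int) (n0 j : Int) (h : n0 ≤ j) :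
    prefMax f n0 (j + 1) = max (prefMax f n0 j) (f (j + 1)) := by
  unfold prefMax
  rw [PySem.List.pyRange_one_succ_right (by omega : n0 ≤ j + 1)]
  rw [PySem.List.pyRange_one_cons (by omega : n0 < j + 1)]
  simp [PySem.List.max?_id_cons, List.foldl_append]

-- the running maximum equals the list of independent prefix maxima
theorem accMax_eq_map_prefMax (f : Int → Int) (n0 : Int) :
    ∀ (k : Nat) (a b m : Int), n0 ≤ a → k = (b - a).toNat → max m (f a) = prefMax f n0 a →
      accMax m ((PySem.List.pyRange a b 1).map f) =
        (PySem.List.pyRange a b 1).map (prefMax f n0) := by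
  intro k
  induction k with
  | zero =>
    intro a b m _ hk _
    rw [PySem.List.pyRange_one_eq_nil (by omega)]
    simp [accMax]
  | succ k ih =>
    intro a b m ha hk hm
    by_cases hab : a < b
    · rw [PySem.List.pyRange_one_cons hab]
      simp only [List.map_cons, accMax]
      rw [hm]
      rw [ih (a + 1) b (prefMax f n0 a) (by omega) (by omega)
            (by rw [← prefMax_step f n0 a ha])]
    · rw [PySem.List.pyRange_one_eq_nil (by omega)]
      simp [accMax]

-- ===== VERDICT (by name: the statement is the Claim_ definition above) =====
theorem running_max_spec : Claim_equal_running_max := by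
  intro data n0 n2 col _ _
  show running_max data n0 n2 col = running_max_alt data n0 n2 col
  unfold running_max running_max_alt
  have hA := runningA_eq data n2 col ((data.length : Int) - n0).toNat n0
      [PySem.List.pyGetD (PySem.List.pyGetD data n0 []) 0 0] []
      (PySem.List.pyGetD (PySem.List.pyGetD data n0 []) col 0) rfl
  set f := fun j => PySem.List.pyGetD (PySem.List.pyGetD data j []) col 0 with hf
  have hB := accMax_eq_map_prefMax f n0
      ((min n2 ((data.length : Int) - 1) + 1) - n0).toNat n0
      (min n2 ((data.length : Int) - 1) + 1) (f n0) le_rfl rfl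
      (by rw [prefMax_base]; simp)
  rw [hB] at hA
  simpa [prefMax] using hA
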